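-- pv_equiv track=rewrite | github.com/zappyk-github/zappyk-python | src/src_zappyk/developing/test-pdf2txt-example-0-coord.py | get_ymax
-- ===== SOURCE A (Python) =====
-- def get_ymax(coord):
--     #maximxum y-coordinate of a character
--     comma = 0
--     pos = 0
--     for i in coord:
--         if (i == ","):
--             comma += 1
--         if (comma == 3):
--             break
--         pos += 1
--     return coord[pos+1:]
-- ===== SOURCE B (Python) =====
-- def get_ymax(coord):
--     parts = coord.split(",", 3)
--     return parts[3] if len(parts) == 4 else ""
-- ===== Notes on version B (the rewrite author's own statement) =====
-- stated objective: idiomatic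
-- what changed: Replaced the per-character comma-counting loop with break by coord.split(',', 3) (partition into at most four pieces) and selecting the fourth piece, returning the empty string when there are fewer than three commas.
import Mathlib
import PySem

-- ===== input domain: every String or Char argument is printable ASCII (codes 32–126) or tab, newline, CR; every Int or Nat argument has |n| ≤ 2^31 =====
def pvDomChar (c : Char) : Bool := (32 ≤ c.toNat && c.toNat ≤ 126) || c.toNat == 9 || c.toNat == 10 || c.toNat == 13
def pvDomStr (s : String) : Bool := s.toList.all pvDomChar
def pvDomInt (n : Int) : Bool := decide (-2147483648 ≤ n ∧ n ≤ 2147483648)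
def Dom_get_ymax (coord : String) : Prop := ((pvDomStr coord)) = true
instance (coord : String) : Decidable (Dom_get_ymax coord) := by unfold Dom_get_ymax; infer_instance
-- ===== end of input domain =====

-- B replaces A's per-character comma-counting scan with split(",", 3) and a
-- partition-then-select of the fourth piece (objective: idiomatic; same behaviour,
-- return value only — neither mutates its argument).

-- ===== PORT A =====
-- the for-loop with its break: state (comma, pos), returns the final pos
def get_ymax_loop : List Char → Int → Int → Int
  | [], _, pos => pos
  | c :: rest, comma, pos =>
    let comma' := if c = ',' then comma + 1 else comma
    if comma' = 3 then pos else get_ymax_loop rest comma' (pos + 1)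

def get_ymax (coord : String) : String :=
  let pos := get_ymax_loop coord.toList 0 0
  PySem.Str.slice coord (some (pos + 1)) none     -- coord[pos+1:]

-- ===== PORT B =====
def get_ymax_alt (coord : String) : String :=
  match PySem.Str.splitMax? coord "," 3 with      -- coord.split(",", 3); sep ≠ "" so never none
  | some [_, _, _, r] => r                        -- len(parts) == 4 → parts[3]
  | _ => ""

-- ===== PRECONDITION & SPEC =====
def Spec_get_ymax (coord : String) (out : String) : Prop := out = get_ymax_alt coord
instance (coord : String) (out : String) : Decidable (Spec_get_ymax coord out) := by unfold Spec_get_ymax; infer_instance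

-- ===== CLAIM (what is proved, stated in full; the proofs are below) =====
def Claim_equal_get_ymax : Prop := ∀ (coord : String), Dom_get_ymax coord → Spec_get_ymax coord (get_ymax coord)

-- ===== LEMMAS AND PROOFS =====

-- reference split: first comma split of a list
def pvFirstSplit : List Char → Option (List Char × List Char)
  | [] => none
  | c :: rest =>
    if c = ',' then some ([], rest)
    else (pvFirstSplit rest).map (fun p => (c :: p.1, p.2))

-- at most m comma splits, remainder as last piece
def pvPieces : Nat → List Char → List (List Char)
  | 0, l => [l]
  | m + 1, l =>
    match pvFirstSplit l with
    | none => [l]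
    | some (b, a) => b :: pvPieces m a

lemma pvPieces_ne_nil (m : Nat) (l : List Char) : pvPieces m l ≠ [] := by
  cases m with
  | zero => simp [pvPieces]
  | succ m =>
    simp only [pvPieces]
    cases pvFirstSplit l with
    | none => simp
    | some p => cases p; simp

lemma pvFirstSplit_cons (c : Char) (rest : List Char) (h : ¬ c = ',') :
    pvFirstSplit (c :: rest) = (pvFirstSplit rest).map (fun p => (c :: p.1, p.2)) := by
  simp [pvFirstSplit, h]

lemma pvPieces_comma (m : Nat) (rest : List Char) :
    pvPieces (m + 1) (',' :: rest) = [] :: pvPieces m rest := by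
  simp [pvPieces, pvFirstSplit]

lemma pvPieces_noncomma (m : Nat) (c : Char) (rest : List Char) (h : ¬ c = ',') :
    pvPieces m (c :: rest) = (pvPieces m rest).modifyHead (fun t => c :: t) := by
  cases m with
  | zero => simp [pvPieces]
  | succ m =>
    simp only [pvPieces, pvFirstSplit_cons c rest h]
    cases hf : pvFirstSplit rest with
    | none => simp
    | some p => cases p; simp

-- the fuel-based splitter go equals the reference pieces
lemma splitOnMax_go_eq (l : List Char) :
    ∀ (fuel m : Nat) (cur : List Char) (acc : List (List Char)),
      l.length < fuel →
      PySem.Chars.splitOnMax.go [','] fuel m l cur acc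
        = acc.reverse ++ (pvPieces m l).modifyHead (fun t => cur.reverse ++ t) := by
  induction l with
  | nil =>
    intro fuel m cur acc h
    cases fuel with
    | zero => omega
    | succ fuel =>
      cases m with
      | zero => simp [PySem.Chars.splitOnMax.go, pvPieces]
      | succ m => simp [PySem.Chars.splitOnMax.go, pvPieces, pvFirstSplit]
  | cons c rest ih =>
    intro fuel m cur acc h
    cases fuel with
    | zero => omega
    | succ fuel =>
      cases m with
      | zero => simp [PySem.Chars.splitOnMax.go, pvPieces]
      | succ m =>
        by_cases hc : c = ','
        · subst hc
          have h' : rest.length < fuel := by simp at h; omega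
          rw [show PySem.Chars.splitOnMax.go [','] (fuel+1) (m+1) (',' :: rest) cur acc
              = PySem.Chars.splitOnMax.go [','] fuel m rest [] (cur.reverse :: acc) by
            simp [PySem.Chars.splitOnMax.go, List.isPrefixOf]]
          rw [ih fuel m [] (cur.reverse :: acc) h', pvPieces_comma]
          cases hp : pvPieces m rest with
          | nil => exact absurd hp (pvPieces_ne_nil m rest)
          | cons p ps => simp
        · have h' : rest.length < fuel := by simp at h; omega
          rw [show PySem.Chars.splitOnMax.go [','] (fuel+1) (m+1) (c :: rest) cur acc
              = PySem.Chars.splitOnMax.go [','] fuel (m+1) rest (c :: cur) acc by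
            simp [PySem.Chars.splitOnMax.go, List.isPrefixOf, Ne.symm hc]]
          rw [ih fuel (m+1) (c :: cur) acc h', pvPieces_noncomma (m+1) c rest hc]
          cases hp : pvPieces (m+1) rest with
          | nil => exact absurd hp (pvPieces_ne_nil (m+1) rest)
          | cons p ps => simp

lemma splitOnMax_eq_pieces (l : List Char) :
    PySem.Chars.splitOnMax l [','] 3 = pvPieces 3 l := by
  have h3 : ¬ ((3:Int) < 0) := by norm_num
  rw [PySem.Chars.splitOnMax, if_neg h3]
  rw [splitOnMax_go_eq l (l.length + 1) ((3:Int)).toNat [] [] (by omega)]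
  rw [show ((3:Int)).toNat = 3 from rfl]
  cases hp : pvPieces 3 l with
  | nil => exact absurd hp (pvPieces_ne_nil _ l)
  | cons p ps => simp

lemma loop_cons_comma (rest : List Char) (comma pos : Int) :
    get_ymax_loop (',' :: rest) comma pos
      = if comma + 1 = 3 then pos else get_ymax_loop rest (comma + 1) (pos + 1) := by
  simp [get_ymax_loop]

lemma loop_cons_other (c : Char) (rest : List Char) (comma pos : Int) (h : ¬ c = ',') :
    get_ymax_loop (c :: rest) comma pos
      = if comma = 3 then pos else get_ymax_loop rest comma (pos + 1) := by
  simp [get_ymax_loop, h]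

-- A's loop shifts with its pos accumulator
lemma loop_shift (l : List Char) : ∀ (comma pos : Int),
    get_ymax_loop l comma pos = pos + get_ymax_loop l comma 0 := by
  induction l with
  | nil => intro comma pos; simp [get_ymax_loop]
  | cons c rest ih =>
    intro comma pos
    by_cases hc : c = ','
    · subst hc
      rw [loop_cons_comma, loop_cons_comma]
      split_ifs
      · omega
      · rw [ih _ (pos + 1), ih _ (0 + 1)]; ring
    · rw [loop_cons_other c rest _ _ hc, loop_cons_other c rest _ _ hc]
      split_ifs
      · omega
      · rw [ih _ (pos + 1), ih _ (0 + 1)]; ring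

lemma loop_nonneg (l : List Char) : ∀ (comma : Int), 0 ≤ get_ymax_loop l comma 0 := by
  induction l with
  | nil => intro comma; simp [get_ymax_loop]
  | cons c rest ih =>
    intro comma
    by_cases hc : c = ','
    · subst hc
      rw [loop_cons_comma]
      split_ifs
      · omega
      · rw [loop_shift]; have := ih (comma + 1); omega
    · rw [loop_cons_other c rest _ _ hc]
      split_ifs
      · omega
      · rw [loop_shift]; have := ih comma; omega

lemma getLastD_modifyHead {α : Type} (f : α → α) (xs : List α) (d : α) (h : 2 ≤ xs.length) :
    (xs.modifyHead f).getLastD d = xs.getLastD d := by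
  match xs with
  | x :: y :: ys => simp

-- core: A's drop equals the last piece when there are 3 commas, [] otherwise
lemma loop_pieces (l : List Char) : ∀ (k : Nat), 1 ≤ k → k ≤ 3 →
    List.drop (get_ymax_loop l ((3:Int) - k) 0 + 1).toNat l
      = (if (pvPieces k l).length = k + 1 then (pvPieces k l).getLastD [] else []) := by
  induction l with
  | nil =>
    intro k h1 h3
    have hnil : pvPieces k [] = [[]] := by cases k <;> simp [pvPieces, pvFirstSplit]
    simp [get_ymax_loop, hnil]
  | cons c rest ih =>
    intro k h1 h3
    by_cases hc : c = ','
    · subst hc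
      rw [loop_cons_comma]
      by_cases hk : k = 1
      · subst hk
        norm_num
        rw [show pvPieces 1 (',' :: rest) = pvPieces (0+1) (',' :: rest) from rfl, pvPieces_comma]
        simp [pvPieces]
      · obtain ⟨k', rfl⟩ : ∃ k', k = k' + 1 := ⟨k - 1, by omega⟩
        have hne : ¬ ((3:Int) - (k' + 1 : Nat) + 1 = 3) := by push_cast; omega
        rw [if_neg hne, loop_shift]
        have hnn := loop_nonneg rest ((3:Int) - (k' + 1 : Nat) + 1)
        have harg : ((3:Int) - (k' + 1 : Nat) + 1) = (3:Int) - k' := by push_cast; ring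
        rw [harg]
        have hdrop : (0 + 1 + get_ymax_loop rest (3 - (k':Int)) 0 + 1).toNat
            = (get_ymax_loop rest (3 - (k':Int)) 0 + 1).toNat + 1 := by
          rw [harg] at hnn; omega
        rw [hdrop, List.drop_succ_cons]
        rw [ih k' (by omega) (by omega), pvPieces_comma]
        have hlen : (([] :: pvPieces k' rest).length = k' + 1 + 1)
            ↔ ((pvPieces k' rest).length = k' + 1) := by simp
        by_cases hl : (pvPieces k' rest).length = k' + 1
        · rw [if_pos hl, if_pos (by simpa using hl)]
          cases hp : pvPieces k' rest with
          | nil => exact absurd hp (pvPieces_ne_nil k' rest)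
          | cons p ps => simp
        · rw [if_neg hl, if_neg (by simpa using hl)]
    · rw [loop_cons_other c rest _ _ hc]
      have hne : ¬ ((3:Int) - (k:Nat) = 3) := by
        intro h; have : (k:Int) = 0 := by omega
        omega
      rw [if_neg hne, loop_shift]
      have hnn := loop_nonneg rest ((3:Int) - k)
      have hdrop : (0 + 1 + get_ymax_loop rest (3 - (k:Int)) 0 + 1).toNat
          = (get_ymax_loop rest (3 - (k:Int)) 0 + 1).toNat + 1 := by omega
      rw [hdrop, List.drop_succ_cons]
      rw [ih k h1 h3, pvPieces_noncomma k c rest hc]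
      by_cases hl : (pvPieces k rest).length = k + 1
      · rw [if_pos hl, if_pos (by simpa using hl)]
        exact (getLastD_modifyHead _ _ _ (by omega)).symm
      · rw [if_neg hl, if_neg (by simpa using hl)]

-- ===== VERDICT (by name: the statement is the Claim_ definition above) =====
theorem get_ymax_spec : Claim_equal_get_ymax := by
  intro coord _
  unfold Spec_get_ymax get_ymax get_ymax_alt
  have hsplit : PySem.Str.splitMax? coord "," 3
      = some ((pvPieces 3 coord.toList).map String.ofList) := by
    have hsep : ("," : String).toList = [','] := rfl
    simp [PySem.Str.splitMax?, PySem.Chars.splitMax?, hsep, splitOnMax_eq_pieces]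
  rw [hsplit]
  have hA := loop_pieces coord.toList 3 (by omega) (by omega)
  norm_num at hA
  have hnn := loop_nonneg coord.toList 0
  rw [← String.toList_inj, PySem.Str.slice]
  rw [show (String.ofList (PySem.Chars.slice coord.toList
        (some (get_ymax_loop coord.toList 0 0 + 1)) none)).toList
      = List.drop (get_ymax_loop coord.toList 0 0 + 1).toNat coord.toList by
    simp only [PySem.Chars.slice_eq_listSlice, String.toList_ofList]
    exact PySem.List.slice_from _ (by omega)]
  rw [hA]
  cases hp : pvPieces 3 coord.toList with
  | nil => exact absurd hp (pvPieces_ne_nil _ _)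
  | cons p ps =>
    match ps with
    | [] => simp
    | [a] => simp
    | [a, b] => simp
    | [a, b, c] => simp

    | a :: b :: c :: d :: es => simp
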